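-- pv_equiv track=rewrite | github.com/ubccr/genesysv | search/utils.py | are_variants_compound_heterozygous
-- ===== SOURCE A (Python) =====
-- def are_variants_compound_heterozygous(variant_genotypes):
--     compound_heterozygous_found = False
--     gt_pair_whose_reverse_to_find = None
--     compound_heterozygous_variants = []
--     for ele in variant_genotypes:
--         father_gt = ele[2]
--         mother_gt = ele[3]
--
--         sum_digits = sum([int(char)
--                           for char in father_gt + mother_gt if char.isdigit()])
--
--         if sum_digits != 1:
--             continue
--
--         if not gt_pair_whose_reverse_to_find:
--             gt_pair_whose_reverse_to_find = [father_gt, mother_gt]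
--             compound_heterozygous_variants.append(ele[0])
--             continue
--
--         current_gt_pair = [father_gt, mother_gt]
--         current_gt_pair.reverse()
--         if gt_pair_whose_reverse_to_find == current_gt_pair:
--             compound_heterozygous_variants.append(ele[0])
--             compound_heterozygous_found = True
--
--     if compound_heterozygous_found:
--         return compound_heterozygous_variants
--     else:
--         return False
-- ===== SOURCE B (Python) =====
-- def are_variants_compound_heterozygous(variant_genotypes):
--     # One reverse pass with a hash index: bucket of ids per (father, mother)
--     # genotype pair among qualifying variants seen so far (i.e. to the right).
--     # Each qualifying variant looks up the reversed pair BEFORE registering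
--     # itself, so when the pass ends at the leftmost qualifying variant (the
--     # anchor), its lookup holds exactly the ids of later matching variants.
--     index = {}
--     result = False
--     for ele in reversed(variant_genotypes):
--         father, mother = ele[2], ele[3]
--         if sum(int(c) for c in father + mother if c.isdigit()) != 1:
--             continue
--         matches = index.get((mother, father), [])
--         result = [ele[0]] + matches if matches else False
--         index[(father, mother)] = [ele[0]] + index.get((father, mother), [])
--     return result
-- ===== Notes on version B (the rewrite author's own statement) =====
-- stated objective: alternative
-- what changed: Replaces A's forward stateful scan (found flag, lazily-set anchor pair compared against each later variant) with a single reverse pass that maintains a hash index from (father,mother) genotype pair to the ids of qualifying variants seen so far; each qualifying variant looks up its reversed pair before registering itself, so the last (leftmost) lookup is the answer.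
import Mathlib
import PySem

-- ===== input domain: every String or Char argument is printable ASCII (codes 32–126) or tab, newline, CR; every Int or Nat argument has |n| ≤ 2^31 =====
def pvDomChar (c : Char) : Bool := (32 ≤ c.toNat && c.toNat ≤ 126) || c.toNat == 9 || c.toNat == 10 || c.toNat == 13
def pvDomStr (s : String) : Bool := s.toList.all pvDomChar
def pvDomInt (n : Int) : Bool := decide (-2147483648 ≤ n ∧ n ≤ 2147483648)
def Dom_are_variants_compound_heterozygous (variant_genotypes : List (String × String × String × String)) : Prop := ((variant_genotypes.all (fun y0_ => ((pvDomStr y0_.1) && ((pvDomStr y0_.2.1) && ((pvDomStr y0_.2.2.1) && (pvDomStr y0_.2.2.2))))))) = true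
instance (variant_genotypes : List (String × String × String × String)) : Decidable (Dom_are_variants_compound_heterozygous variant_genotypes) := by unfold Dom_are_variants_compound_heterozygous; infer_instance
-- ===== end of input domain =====

-- B replaces A's forward stateful anchor scan by a single reverse pass with a hash index
-- (genotype pair -> ids of qualifying variants to the right); same cost, different algorithm.
-- The Python programs return a list / False; under the Bool convention the ports return the truthiness of that value.

-- shared helper: both Pythons compute sum(int(c) for c in father+mother if c.isdigit()), exact on ASCII
def pvDigitSum (s : List Char) : Int :=
  (s.filter Char.isDigit).foldl (fun a c => a + ((c.toNat : Int) - 48)) 0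

def pvQual (e : String × String × String × String) : Bool :=
  pvDigitSum (e.2.2.1.toList ++ e.2.2.2.toList) == 1

-- ===== PORT A =====
-- A's loop state: the found flag and the optional anchor pair (the id list only affects the discarded list value)
def pvLoopA : List (String × String × String × String) → Bool → Option (String × String) → Bool
  | [], found, _ => found
  | e :: rest, found, pairOpt =>
    if pvQual e then
      match pairOpt with
      | none => pvLoopA rest found (some (e.2.2.1, e.2.2.2))
      | some (pf, pm) =>
        if pf == e.2.2.2 && pm == e.2.2.1 then pvLoopA rest true (some (pf, pm))
        else pvLoopA rest found (some (pf, pm))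
    else pvLoopA rest found pairOpt

def are_variants_compound_heterozygous (variant_genotypes : List (String × String × String × String)) : Bool :=
  pvLoopA variant_genotypes false none

-- ===== PORT B =====
-- loop body of Source B: state = (index : pair -> ids of qualifying variants seen so far, result truthiness)
def pvStepB (st : PySem.Dict (String × String) (List String) × Bool)
    (e : String × String × String × String) :
    PySem.Dict (String × String) (List String) × Bool :=
  let father := e.2.2.1
  let mother := e.2.2.2
  if pvDigitSum (father.toList ++ mother.toList) == 1 then
    let ms := st.1.getD (mother, father) []
    -- result = [ele[0]] + matches if matches else False : truthiness = matches ≠ []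
    (st.1.insert (father, mother) (e.1 :: st.1.getD (father, mother) []), !ms.isEmpty)
  else st

def are_variants_compound_heterozygous_alt (variant_genotypes : List (String × String × String × String)) : Bool :=
  (variant_genotypes.reverse.foldl pvStepB (PySem.Dict.empty, false)).2

-- ===== PRECONDITION & SPEC =====
def Spec_are_variants_compound_heterozygous (variant_genotypes : List (String × String × String × String)) (out : Bool) : Prop := out = are_variants_compound_heterozygous_alt variant_genotypes
instance (variant_genotypes : List (String × String × String × String)) (out : Bool) : Decidable (Spec_are_variants_compound_heterozygous variant_genotypes out) := by unfold Spec_are_variants_compound_heterozygous; infer_instance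

-- ===== CLAIM (what is proved, stated in full; the proofs are below) =====
def Claim_equal_are_variants_compound_heterozygous : Prop := ∀ (variant_genotypes : List (String × String × String × String)), Dom_are_variants_compound_heterozygous variant_genotypes → Spec_are_variants_compound_heterozygous variant_genotypes (are_variants_compound_heterozygous variant_genotypes)

-- ===== LEMMAS AND PROOFS =====

-- common reference value both ports are reduced to: anchor = first qualifying variant,
-- answer = some later qualifying variant has the reversed genotype pair
def pvRef (l : List (String × String × String × String)) : Bool :=
  match l.filter pvQual with
  | [] => false
  | a :: rest => rest.any (fun e => e.2.2.1 == a.2.2.2 && e.2.2.2 == a.2.2.1)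

def pvFoldB (l : List (String × String × String × String)) :
    PySem.Dict (String × String) (List String) × Bool :=
  l.foldr (fun e st => pvStepB st e) (PySem.Dict.empty, false)

theorem pvFoldB_fst (l : List (String × String × String × String)) (p : String × String) :
    (pvFoldB l).1.getD p [] =
      ((l.filter pvQual).filter (fun e => (e.2.2.1, e.2.2.2) == p)).map (·.1) := by
  induction l with
  | nil => simp [pvFoldB, PySem.Dict.getD_empty]
  | cons e rest ih =>
    show (pvStepB (pvFoldB rest) e).1.getD p [] = _
    by_cases hq : pvQual e
    · have hq' : (pvDigitSum (e.2.2.1.toList ++ e.2.2.2.toList) == 1) = true := hq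
      simp only [pvStepB, hq', if_true, List.filter_cons, hq]
      rw [PySem.Dict.getD_insert]
      by_cases hp : p = (e.2.2.1, e.2.2.2)
      · simp only [hp] at ih ⊢
        simp [ih, List.filter_cons]
      · have hne : ((e.2.2.1, e.2.2.2) == p) = false := by
          simp [beq_iff_eq]; exact fun h => hp h.symm
        simp [hp, ih, List.filter_cons, hne]
    · have hq' : ¬ (pvDigitSum (e.2.2.1.toList ++ e.2.2.2.toList) == 1) = true := hq
      simp only [pvStepB, hq', if_false, List.filter_cons, hq]
      exact ih

theorem pvIsEmptyFilter {α : Type} (p : α → Bool) (l : List α) :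
    (l.filter p).isEmpty = !l.any p := by
  induction l with
  | nil => simp
  | cons a t ih => by_cases h : p a <;> simp [h, ih]

theorem pvFoldB_snd (l : List (String × String × String × String)) :
    (pvFoldB l).2 = pvRef l := by
  induction l with
  | nil => simp [pvFoldB, pvRef]
  | cons e rest ih =>
    by_cases hq : pvQual e
    · have hq' : pvDigitSum (e.2.2.1.toList ++ e.2.2.2.toList) == 1 := hq
      show (pvStepB (pvFoldB rest) e).2 = pvRef (e :: rest)
      simp only [pvStepB, hq', if_true, pvRef, List.filter_cons, hq]
      rw [pvFoldB_fst]
      simp only [List.isEmpty_map, pvIsEmptyFilter, Bool.not_not]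
      apply List.any_congr <;> intros <;> rfl
    · show (pvStepB (pvFoldB rest) e).2 = pvRef (e :: rest)
      have hq' : ¬ (pvDigitSum (e.2.2.1.toList ++ e.2.2.2.toList) == 1) = true := hq
      simp only [pvStepB, hq', if_false, pvRef, List.filter_cons, hq]
      simpa [pvRef] using ih

-- once the anchor pair is set, A's loop just tests each remaining qualifying variant against it
theorem pvLoopA_some (l : List (String × String × String × String)) (pf pm : String) (found : Bool) :
    pvLoopA l found (some (pf, pm))
      = (found || (l.filter pvQual).any (fun e => e.2.2.1 == pm && e.2.2.2 == pf)) := by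
  induction l generalizing found with
  | nil => simp [pvLoopA]
  | cons e rest ih =>
    by_cases hq : pvQual e
    · have hswap : (e.2.2.1 == pm && e.2.2.2 == pf) = (pf == e.2.2.2 && pm == e.2.2.1) := by
        rw [BEq.comm, BEq.comm (a := e.2.2.2) (b := pf), Bool.and_comm]
      by_cases hm : (pf == e.2.2.2 && pm == e.2.2.1) = true
      · simp [pvLoopA, hq, hm, ih, hswap, List.filter_cons, List.any_cons]
      · rw [Bool.not_eq_true] at hm
        simp [pvLoopA, hq, hm, ih, hswap, List.filter_cons, List.any_cons]
    · simp [pvLoopA, hq, ih, List.filter_cons]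

theorem pvLoopA_eq_ref (l : List (String × String × String × String)) :
    pvLoopA l false none = pvRef l := by
  induction l with
  | nil => simp [pvLoopA, pvRef]
  | cons e rest ih =>
    by_cases hq : pvQual e
    · simp only [pvLoopA, hq, if_true]
      rw [pvLoopA_some]
      simp [pvRef, List.filter_cons, hq]
    · simp only [pvLoopA, hq, if_false]
      simpa [pvRef, List.filter_cons, hq] using ih

-- ===== VERDICT (by name: the statement is the Claim_ definition above) =====
theorem are_variants_compound_heterozygous_spec : Claim_equal_are_variants_compound_heterozygous := by
  intro vg _
  unfold Spec_are_variants_compound_heterozygous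
  unfold are_variants_compound_heterozygous are_variants_compound_heterozygous_alt
  rw [List.foldl_reverse]
  rw [pvLoopA_eq_ref]
  exact (pvFoldB_snd vg).symm
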